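-- pv_equiv track=rewrite | github.com/luizirber/phd | experiments/smol_gather/scripts/smol2.py | canonical_kmers
-- ===== SOURCE A (Python) =====
-- from typing import Optional, Set, IO, List, Iterable
--
-- __complementTranslation = {"A": "T", "C": "G", "G": "C", "T": "A", "N": "N"}
--
-- def reverse_complement(s: str) -> str:
--     """
--     Return the reverse complement of 's'.
--     """
--     return "".join(reversed([__complementTranslation.get(n, "-") for n in s]))
--
-- def canonical_kmers(seq: str, k: int) -> Iterable[str]:
--     for start in range(len(seq) - k + 1):
--         kmer = seq[start : start + k].upper()
--         rev_kmer = reverse_complement(kmer)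
--
--         if rev_kmer < kmer:
--             kmer = rev_kmer
--
--         if any(c not in "ACGT" for c in kmer):
--             continue
--
--         yield kmer
-- ===== SOURCE B (Python) =====
-- def canonical_kmers(seq, k):
--     # One pass: uppercase once, track the most recent invalid-character index so
--     # each window's validity check is O(1) instead of rescanning k characters.
--     comp = {"A": "T", "C": "G", "G": "C", "T": "A"}
--     s = seq.upper()
--     result = []
--     if k < 1:
--         return result
--     bad = -1  # index of the most recently seen character not in ACGT
--     for j, c in enumerate(s):
--         if c not in comp:
--             bad = j
--         if j >= k - 1 and bad <= j - k:
--             kmer = s[j - k + 1 : j + 1]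
--             rc = "".join(comp[x] for x in reversed(kmer))
--             result.append(min(kmer, rc))
--     return result
-- ===== Notes on version B (the rewrite author's own statement) =====
-- stated objective: faster
-- what changed: B uppercases once and does a single left-to-right pass that tracks the index of the last invalid character, so each window's validity is decided in O(1) instead of A's per-window upper()+reverse_complement()+rescan; B also drops A's degenerate k<1 windows.
-- intended difference: For k < 1 A's range(len(seq)-k+1) loop still runs and each degenerate slice seq[start:start+k] is '' (negative k also yields stray shortened slices), so A yields empty strings; B returns [], the intended value since a k-mer requires k >= 1. — e.g. on canonical_kmers("A", 0): A returns ["", ""], B returns []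
import Mathlib
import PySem

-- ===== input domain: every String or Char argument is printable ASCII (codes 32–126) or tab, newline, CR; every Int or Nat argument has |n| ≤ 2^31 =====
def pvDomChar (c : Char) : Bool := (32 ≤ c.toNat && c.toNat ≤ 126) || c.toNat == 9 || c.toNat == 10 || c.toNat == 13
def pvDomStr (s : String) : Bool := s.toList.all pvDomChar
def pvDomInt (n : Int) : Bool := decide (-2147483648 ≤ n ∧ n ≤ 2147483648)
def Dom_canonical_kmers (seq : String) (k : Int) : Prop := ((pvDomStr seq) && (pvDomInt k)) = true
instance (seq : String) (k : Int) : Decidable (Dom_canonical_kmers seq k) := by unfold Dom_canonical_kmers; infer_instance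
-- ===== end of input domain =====

-- B replaces A's per-window revalidation scans by a one-pass last-invalid-index tracker (and uppercases once);
-- for k < 1 A's degenerate windows accidentally yield empty strings, B returns [] (see D_ below).

-- ===== PORT A =====
-- __complementTranslation = {"A": "T", "C": "G", "G": "C", "T": "A", "N": "N"}
def pvCompA : PySem.Dict String String :=
  PySem.Dict.mk [("A", "T"), ("C", "G"), ("G", "C"), ("T", "A"), ("N", "N")]

-- "".join(reversed([__complementTranslation.get(n, "-") for n in s]))
def reverse_complement (s : String) : String :=
  PySem.Str.join "" (s.toList.map (fun n => pvCompA.getD (String.ofList [n]) "-")).reverse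

def canonical_kmers (seq : String) (k : Int) : List String :=
  (PySem.List.pyRange 0 (PySem.Str.len seq - k + 1) 1).foldl
    (fun acc start =>
      let kmer0 := PySem.Str.upper (PySem.Str.slice seq (some start) (some (start + k)))
      let rev_kmer := reverse_complement kmer0
      -- rev_kmer < kmer (Python string comparison = code-point lexicographic on the char lists)
      let kmer := if PySem.Chars.strLt rev_kmer.toList kmer0.toList then rev_kmer else kmer0
      if kmer.toList.any (fun c => !(PySem.Str.isIn (String.ofList [c]) "ACGT")) then acc
      else acc ++ [kmer])
    []

-- ===== PORT B =====
-- comp = {'A': 'T', 'C': 'G', 'G': 'C', 'T': 'A'}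
def pvCompB : PySem.Dict String String :=
  PySem.Dict.mk [("A", "T"), ("C", "G"), ("G", "C"), ("T", "A")]

def canonical_kmers_alt (seq : String) (k : Int) : List String :=
  let s := PySem.Str.upper seq
  if k < 1 then []
  else
    ((PySem.List.enumerate s.toList).foldl
      (fun (st : Int × List String) jc =>
        let bad := if !(pvCompB.contains (String.ofList [jc.2])) then jc.1 else st.1
        if jc.1 ≥ k - 1 ∧ bad ≤ jc.1 - k then
          let kmer := PySem.Str.slice s (some (jc.1 - k + 1)) (some (jc.1 + 1))
          -- comp[x]: KeyError unreachable here (the window was just checked valid), so getD's default is never read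
          let rc := PySem.Str.join "" (kmer.toList.reverse.map (fun x => pvCompB.getD (String.ofList [x]) "-"))
          -- min(kmer, rc) (Python string comparison, as above)
          (bad, st.2 ++ [if PySem.Chars.strLt rc.toList kmer.toList then rc else kmer])
        else (bad, st.2))
      (-1, [])).2

-- ===== PRECONDITION & SPEC =====
-- For k < 1 the loop `range(len(seq) - k + 1)` still runs and every slice seq[start:start+k] of
-- non-positive window length is '' (negative k also yields stray shortened slices), so A accidentally
-- yields empty strings; B returns [] there, the intended value since a k-mer needs k ≥ 1.
def D_canonical_kmers (seq : String) (k : Int) : Prop := k < 1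
instance (seq : String) (k : Int) : Decidable (D_canonical_kmers seq k) := by
  unfold D_canonical_kmers; infer_instance

def Spec_canonical_kmers (seq : String) (k : Int) (out : List String) : Prop :=
  ¬ D_canonical_kmers seq k → out = canonical_kmers_alt seq k
instance (seq : String) (k : Int) (out : List String) : Decidable (Spec_canonical_kmers seq k out) := by
  unfold Spec_canonical_kmers; infer_instance

def pvDiffWitness_canonical_kmers : String × Int := ("A", 0)
def pvDiffWitnessOut_canonical_kmers : (List String) × (List String) := (["", ""], [])

-- ===== CLAIM (what is proved, stated in full; the proofs are below) =====
def Claim_unchanged_canonical_kmers : Prop := ∀ (seq : String) (k : Int), Dom_canonical_kmers seq k → Spec_canonical_kmers seq k (canonical_kmers seq k)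
def Claim_changed_canonical_kmers : Prop := Dom_canonical_kmers (pvDiffWitness_canonical_kmers.1) (pvDiffWitness_canonical_kmers.2) ∧ D_canonical_kmers (pvDiffWitness_canonical_kmers.1) (pvDiffWitness_canonical_kmers.2) ∧ canonical_kmers (pvDiffWitness_canonical_kmers.1) (pvDiffWitness_canonical_kmers.2) = pvDiffWitnessOut_canonical_kmers.1 ∧ canonical_kmers_alt (pvDiffWitness_canonical_kmers.1) (pvDiffWitness_canonical_kmers.2) = pvDiffWitnessOut_canonical_kmers.2 ∧ pvDiffWitnessOut_canonical_kmers.1 ≠ pvDiffWitnessOut_canonical_kmers.2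
def Claim_exact_canonical_kmers : Prop := ∀ (seq : String) (k : Int), Dom_canonical_kmers seq k → D_canonical_kmers seq k → canonical_kmers seq k ≠ canonical_kmers_alt seq k

-- ===== LEMMAS AND PROOFS =====

-- valid character (after upper-casing): one of A C G T
def vCh (c : Char) : Bool := c == 'A' || c == 'C' || c == 'G' || c == 'T'

-- char-level complement: what __complementTranslation.get(·, "-") does on a single character
def cCh (c : Char) : Char :=
  if c = 'A' then 'T' else if c = 'C' then 'G' else if c = 'G' then 'C'
  else if c = 'T' then 'A' else if c = 'N' then 'N' else '-'

-- canonical form of one window, at the char-list level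
def canonL (l : List Char) : List Char :=
  if PySem.Chars.strLt ((l.map cCh).reverse) l then (l.map cCh).reverse else l

def winL (w : List Char) (k st : Int) : List Char :=
  PySem.List.slice w (some st) (some (st + k))

-- reference value both ports compute (on the uppercased char list w)
def AmL (w : List Char) (k : Int) : List String :=
  ((PySem.List.pyRange 0 ((w.length : Int) - k + 1) 1).filter
      (fun st => (winL w k st).all vCh)).map
    (fun st => String.ofList (canonL (winL w k st)))

-- B's `bad` accumulator: index of the last invalid character of w (-1 if none)
def badAcc (w : List Char) : Int :=
  (PySem.List.enumerate w 0).foldl (fun b jc => if !(vCh jc.2) then jc.1 else b) (-1)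

lemma vCh_cCh (c : Char) : vCh (cCh c) = vCh c := by
  unfold cCh vCh; split_ifs <;> simp_all

lemma single_beq (d c : Char) : (String.ofList [d] == String.ofList [c]) = (d == c) := by
  by_cases h : d = c
  · simp [h]
  · have h2 : String.ofList [d] ≠ String.ofList [c] := by
      simpa [← String.toList_inj] using h
    simp [h, h2]

lemma str_A : ("A" : String) = String.ofList ['A'] := by decide
lemma str_C : ("C" : String) = String.ofList ['C'] := by decide
lemma str_G : ("G" : String) = String.ofList ['G'] := by decide
lemma str_T : ("T" : String) = String.ofList ['T'] := by decide
lemma str_N : ("N" : String) = String.ofList ['N'] := by decide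
lemma str_dash : ("-" : String) = String.ofList ['-'] := by decide

lemma getD_A (c : Char) :
    pvCompA.getD (String.ofList [c]) "-" = String.ofList [cCh c] := by
  by_cases h1 : c = 'A'
  · subst h1; decide
  by_cases h2 : c = 'C'
  · subst h2; decide
  by_cases h3 : c = 'G'
  · subst h3; decide
  by_cases h4 : c = 'T'
  · subst h4; decide
  by_cases h5 : c = 'N'
  · subst h5; decide
  unfold pvCompA cCh
  simp only [PySem.Dict.getD, PySem.Dict.get?_mk_cons, str_A, str_C, str_G, str_T, str_N,
    str_dash, single_beq]
  rw [beq_eq_false_iff_ne.mpr (Ne.symm h1), beq_eq_false_iff_ne.mpr (Ne.symm h2),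
    beq_eq_false_iff_ne.mpr (Ne.symm h3), beq_eq_false_iff_ne.mpr (Ne.symm h4),
    beq_eq_false_iff_ne.mpr (Ne.symm h5)]
  simp [PySem.Dict.get?, h1, h2, h3, h4, h5]

lemma getD_B (c : Char) (h : vCh c = true) :
    pvCompB.getD (String.ofList [c]) "-" = String.ofList [cCh c] := by
  by_cases h1 : c = 'A'
  · subst h1; decide
  by_cases h2 : c = 'C'
  · subst h2; decide
  by_cases h3 : c = 'G'
  · subst h3; decide
  by_cases h4 : c = 'T'
  · subst h4; decide
  exfalso
  unfold vCh at h
  simp [h1, h2, h3, h4] at h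

lemma contains_B (c : Char) : pvCompB.contains (String.ofList [c]) = vCh c := by
  by_cases h1 : c = 'A'
  · subst h1; decide
  by_cases h2 : c = 'C'
  · subst h2; decide
  by_cases h3 : c = 'G'
  · subst h3; decide
  by_cases h4 : c = 'T'
  · subst h4; decide
  unfold pvCompB vCh
  simp only [PySem.Dict.contains_mk, List.any_cons, List.any_nil, str_A, str_C, str_G, str_T,
    single_beq]
  rw [beq_eq_false_iff_ne.mpr (Ne.symm h1), beq_eq_false_iff_ne.mpr (Ne.symm h2),
    beq_eq_false_iff_ne.mpr (Ne.symm h3), beq_eq_false_iff_ne.mpr (Ne.symm h4)]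
  simp [h1, h2, h3, h4]

lemma single_infix (c : Char) (l : List Char) : [c] <:+: l ↔ c ∈ l := by
  constructor
  · intro h; exact h.subset (List.mem_singleton_self c)
  · intro h
    obtain ⟨s, t, rfl⟩ := List.append_of_mem h
    exact ⟨s, t, by simp⟩

lemma isIn_single (c : Char) : PySem.Str.isIn (String.ofList [c]) "ACGT" = vCh c := by
  have hiff : PySem.Str.isIn (String.ofList [c]) "ACGT" = true ↔ c ∈ ['A', 'C', 'G', 'T'] := by
    rw [PySem.Str.isIn_iff_infix, String.toList_ofList,
      show ("ACGT" : String).toList = ['A', 'C', 'G', 'T'] from by decide, single_infix]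
  by_cases hm : c ∈ ['A', 'C', 'G', 'T']
  · rw [hiff.mpr hm]
    simp at hm
    unfold vCh
    rcases hm with h | h | h | h <;> simp [h]
  · have hfalse : PySem.Str.isIn (String.ofList [c]) "ACGT" = false := by
      cases hx : PySem.Str.isIn (String.ofList [c]) "ACGT"
      · rfl
      · exact absurd (hiff.mp hx) hm
    rw [hfalse]
    symm
    unfold vCh
    simp at hm
    simp [hm]

lemma rc_toList (s : String) :
    (reverse_complement s).toList = (s.toList.map cCh).reverse := by
  unfold reverse_complement
  rw [PySem.Str.toList_join]
  simp only [getD_A]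
  rw [show ("" : String).toList = [] from rfl]
  rw [List.map_reverse, List.map_map]
  rw [show (String.toList ∘ fun n => String.ofList [cCh n]) = (fun n => [n]) ∘ cCh from
    funext fun n => by simp]
  rw [← List.map_map, ← List.map_reverse, PySem.Chars.join_nil_singletons]

lemma slice_map (w : List Char) (f : Char → Char) (a b : Int) :
    PySem.List.slice (w.map f) (some a) (some b) = (PySem.List.slice w (some a) (some b)).map f := by
  simp [PySem.List.slice, PySem.List.clampIdx, List.map_drop, List.map_take]

lemma slice_prefix (u L : List Char) (hp : u <+: L) (a b : Int)
    (ha : 0 ≤ a) (hb : 0 ≤ b) (hbl : b ≤ (u.length : Int)) :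
    PySem.List.slice L (some a) (some b) = PySem.List.slice u (some a) (some b) := by
  rw [PySem.List.slice_toNat _ ha hb, PySem.List.slice_toNat _ ha hb]
  obtain ⟨t, rfl⟩ := hp
  by_cases hab : a.toNat ≤ b.toNat
  · have hau : a.toNat ≤ u.length := le_trans hab (by omega)
    rw [List.drop_append_of_le_length hau]
    rw [List.take_append_of_le_length (by simp; omega)]
  · have : b.toNat - a.toNat = 0 := by omega
    simp [this]

lemma canonL_all (l : List Char) : (canonL l).all vCh = l.all vCh := by
  unfold canonL
  split_ifs with h
  · rw [List.all_reverse, List.all_map]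
    rw [show vCh ∘ cCh = vCh from funext fun c => vCh_cCh c]
  · rfl

lemma pyRange_nil (a b : Int) (h : b ≤ a) : PySem.List.pyRange a b 1 = [] := by
  rw [PySem.List.pyRange_one]
  rw [Int.toNat_of_nonpos (by omega)]
  rfl

lemma pyRange_singleton (m : Int) : PySem.List.pyRange m (m + 1) 1 = [m] := by
  rw [PySem.List.pyRange_one]
  norm_num

lemma badAcc_nil : badAcc [] = -1 := rfl

lemma badAcc_append (w : List Char) (c : Char) :
    badAcc (w ++ [c]) = if !(vCh c) then (w.length : Int) else badAcc w := by
  unfold badAcc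
  rw [PySem.List.enumerate_append, List.foldl_append]
  have : PySem.List.enumerate [c] (0 + (w.length : Int)) = [((0 + (w.length : Int)), c)] := by
    simp [PySem.List.enumerate]
  rw [this]
  simp

lemma badAcc_le_iff (w : List Char) (m : Int) (hm : -1 ≤ m) :
    badAcc w ≤ m ↔ ((w.drop (m + 1).toNat).all vCh = true) := by
  induction w using List.reverseRecOn with
  | nil => simp [badAcc_nil, hm]
  | append_singleton u c ih =>
    rw [badAcc_append]
    by_cases hvc : vCh c = true
    · rw [hvc]
      simp only [Bool.not_true, Bool.false_eq_true, if_false]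
      rw [ih]
      by_cases hml : (u.length : Int) ≤ m
      · have h1 : u.length ≤ (m + 1).toNat := by omega
        rw [List.drop_eq_nil_of_le h1, List.drop_eq_nil_of_le (by simp; omega)]
      · have h2 : (m + 1).toNat ≤ u.length := by omega
        rw [List.drop_append_of_le_length h2]
        simp [hvc]
    · have hvc' : vCh c = false := by simpa using hvc
      rw [hvc']
      simp only [Bool.not_false, if_true]
      constructor
      · intro h
        have h1 : u.length ≤ (m + 1).toNat := by omega
        rw [List.drop_eq_nil_of_le (by simp; omega)]
        rfl
      · intro h
        by_contra hcon
        have h2 : (m + 1).toNat ≤ u.length := by omega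
        rw [List.drop_append_of_le_length h2] at h
        rw [List.all_append] at h
        simp [hvc'] at h

-- A's loop computes AmL of the uppercased sequence
set_option maxHeartbeats 1000000 in
lemma A_norm (seq : String) (k : Int) :
    canonical_kmers seq k = AmL (PySem.Chars.upper seq.toList) k := by
  unfold canonical_kmers AmL
  have hlen : (PySem.Chars.upper seq.toList).length = seq.toList.length := by
    show (seq.toList.map PySem.Chars.upperChar).length = _
    exact List.length_map ..
  rw [PySem.Str.len_eq, ← hlen]
  have hbody : ∀ (acc : List String) (st : Int),
      (fun (acc : List String) start =>
        let kmer0 := PySem.Str.upper (PySem.Str.slice seq (some start) (some (start + k)))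
        let rev_kmer := reverse_complement kmer0
        let kmer := if PySem.Chars.strLt rev_kmer.toList kmer0.toList then rev_kmer else kmer0
        if kmer.toList.any (fun c => !(PySem.Str.isIn (String.ofList [c]) "ACGT")) then acc
        else acc ++ [kmer]) acc st
      = (if (winL (PySem.Chars.upper seq.toList) k st).all vCh = true then
            acc ++ [String.ofList (canonL (winL (PySem.Chars.upper seq.toList) k st))]
         else acc) := by
    intro acc st
    simp only []
    have hk0 : (PySem.Str.upper (PySem.Str.slice seq (some st) (some (st + k)))).toList
        = winL (PySem.Chars.upper seq.toList) k st := by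
      rw [PySem.Str.toList_upper, PySem.Str.toList_slice]
      show PySem.Chars.upper (PySem.Chars.slice seq.toList (some st) (some (st + k))) = _
      unfold winL
      rw [PySem.Chars.slice_eq_listSlice]
      show (PySem.List.slice seq.toList (some st) (some (st + k))).map PySem.Chars.upperChar = _
      rw [← slice_map]
      rfl
    set W := winL (PySem.Chars.upper seq.toList) k st with hW
    have hrev : (reverse_complement
        (PySem.Str.upper (PySem.Str.slice seq (some st) (some (st + k))))).toList
        = (W.map cCh).reverse := by
      rw [rc_toList, hk0]
    have hkmer : (if PySem.Chars.strLt
          (reverse_complement (PySem.Str.upper (PySem.Str.slice seq (some st) (some (st + k))))).toList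
          (PySem.Str.upper (PySem.Str.slice seq (some st) (some (st + k)))).toList then
          reverse_complement (PySem.Str.upper (PySem.Str.slice seq (some st) (some (st + k))))
        else PySem.Str.upper (PySem.Str.slice seq (some st) (some (st + k))))
        = String.ofList (canonL W) := by
      rw [hrev, hk0]
      unfold canonL
      split_ifs with h
      · rw [← hrev, String.ofList_toList]
      · rw [← hk0, String.ofList_toList]
    rw [hkmer]
    have htest : (String.ofList (canonL W)).toList.any
        (fun c => !(PySem.Str.isIn (String.ofList [c]) "ACGT")) = !((canonL W).all vCh) := by
      rw [String.toList_ofList]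
      simp only [isIn_single]
      rw [List.all_eq_not_any_not]
      simp
    rw [htest, canonL_all]
    by_cases h : W.all vCh = true
    · simp [h]
    · simp [h]
  rw [PySem.List.foldl_congr_mem _ _ _ _ (fun acc x _ => hbody acc x)]
  rw [PySem.List.foldl_append_if (fun st => (winL (PySem.Chars.upper seq.toList) k st).all vCh)
    (fun st => String.ofList (canonL (winL (PySem.Chars.upper seq.toList) k st)))]
  rw [List.nil_append]

-- appending one character extends AmL by (at most) the window that ends at it
set_option maxHeartbeats 1000000 in
lemma AmL_append (w : List Char) (c : Char) (k : Int) (hk : 1 ≤ k) :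
    AmL (w ++ [c]) k = AmL w k ++
      (if ((w.length : Int) ≥ k - 1 ∧ (winL (w ++ [c]) k ((w.length : Int) + 1 - k)).all vCh) then
        [String.ofList (canonL (winL (w ++ [c]) k ((w.length : Int) + 1 - k)))]
      else []) := by
  unfold AmL
  rw [List.length_append, List.length_singleton]
  by_cases h1 : (w.length : Int) ≥ k - 1
  · have hsplit : PySem.List.pyRange 0 ((↑(w.length + 1) : Int) - k + 1) 1
        = PySem.List.pyRange 0 ((w.length : Int) - k + 1) 1 ++ [(w.length : Int) + 1 - k] := by
      have hm : ((w.length : Int) + 1 - k) = ((w.length : Int) - k + 1) := by ring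
      rw [show ((↑(w.length + 1) : Int) - k + 1) = ((w.length : Int) - k + 1) + 1 from by push_cast; ring]
      rw [PySem.List.pyRange_one_append 0 ((w.length : Int) - k + 1) _ (by omega) (by omega)]
      rw [pyRange_singleton, hm]
    rw [hsplit, List.filter_append, List.map_append]
    have hwin_eq : ∀ st ∈ PySem.List.pyRange 0 ((w.length : Int) - k + 1) 1,
        winL (w ++ [c]) k st = winL w k st := by
      intro st hst
      rw [PySem.List.mem_pyRange_one] at hst
      unfold winL
      exact slice_prefix w (w ++ [c]) ⟨[c], rfl⟩ st (st + k) hst.1 (by omega) (by omega)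
    have hfilter : (PySem.List.pyRange 0 ((w.length : Int) - k + 1) 1).filter
          (fun st => (winL (w ++ [c]) k st).all vCh)
        = (PySem.List.pyRange 0 ((w.length : Int) - k + 1) 1).filter
          (fun st => (winL w k st).all vCh) := by
      apply List.filter_congr
      intro st hst
      rw [hwin_eq st hst]
    rw [hfilter]
    have hmap : ((PySem.List.pyRange 0 ((w.length : Int) - k + 1) 1).filter
          (fun st => (winL w k st).all vCh)).map
          (fun st => String.ofList (canonL (winL (w ++ [c]) k st)))
        = ((PySem.List.pyRange 0 ((w.length : Int) - k + 1) 1).filter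
          (fun st => (winL w k st).all vCh)).map
          (fun st => String.ofList (canonL (winL w k st))) := by
      apply List.map_congr_left
      intro st hst
      rw [hwin_eq st (List.mem_of_mem_filter hst)]
    rw [hmap]
    congr 1
    by_cases h2 : (winL (w ++ [c]) k ((w.length : Int) + 1 - k)).all vCh = true
    · simp [h1, h2]
    · simp [h1, h2]
  · have he1 : ((w.length : Int) - k + 1) ≤ 0 := by omega
    have he2 : ((↑(w.length + 1) : Int) - k + 1) ≤ 0 := by push_cast; omega
    rw [pyRange_nil _ _ (by omega), pyRange_nil _ _ (by omega)]
    simp [h1]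

-- the key induction: B's fold over any prefix u of s computes (badAcc u, AmL u k)
set_option maxHeartbeats 1000000 in
lemma B_fold (k : Int) (hk : 1 ≤ k) (s : String) :
    ∀ (u : List Char), u <+: s.toList →
    ((PySem.List.enumerate u 0).foldl
      (fun (st : Int × List String) jc =>
        let bad := if !(pvCompB.contains (String.ofList [jc.2])) then jc.1 else st.1
        if jc.1 ≥ k - 1 ∧ bad ≤ jc.1 - k then
          let kmer := PySem.Str.slice s (some (jc.1 - k + 1)) (some (jc.1 + 1))
          let rc := PySem.Str.join "" (kmer.toList.reverse.map (fun x => pvCompB.getD (String.ofList [x]) "-"))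
          (bad, st.2 ++ [if PySem.Chars.strLt rc.toList kmer.toList then rc else kmer])
        else (bad, st.2))
      ((-1 : Int), ([] : List String))) = (badAcc u, AmL u k) := by
  intro u
  induction u using List.reverseRecOn with
  | nil =>
    intro _
    rw [show PySem.List.enumerate ([] : List Char) 0 = [] from rfl]
    rw [badAcc_nil]
    unfold AmL
    rw [pyRange_nil _ _ (by simp only [List.length_nil, Nat.cast_zero]; omega)]
    rfl
  | append_singleton u c ih =>
    intro hp
    have hpu : u <+: s.toList := ((u.prefix_append [c]).trans hp)
    rw [PySem.List.enumerate_append, List.foldl_append, ih hpu]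
    have henum1 : PySem.List.enumerate [c] (0 + (u.length : Int)) = [((0 + (u.length : Int)), c)] := by
      simp [PySem.List.enumerate]
    rw [henum1, List.foldl_cons, List.foldl_nil]
    simp only [contains_B]
    have hbad : (if !(vCh c) then 0 + (u.length : Int) else badAcc u) = badAcc (u ++ [c]) := by
      rw [badAcc_append]; norm_num
    rw [AmL_append u c k hk]
    simp only [hbad]
    by_cases h1 : (0 + (u.length : Int)) ≥ k - 1
    · have h1' : (u.length : Int) ≥ k - 1 := by omega
      have hwin : winL (u ++ [c]) k ((u.length : Int) + 1 - k)
          = (u ++ [c]).drop ((u.length : Int) + 1 - k).toNat := by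
        unfold winL
        rw [PySem.List.slice_toNat _ (by omega) (by omega)]
        rw [List.take_of_length_le (by
          simp only [List.length_drop, List.length_append, List.length_singleton]
          omega)]
      have hcond : (badAcc (u ++ [c]) ≤ 0 + (u.length : Int) - k)
          ↔ ((winL (u ++ [c]) k ((u.length : Int) + 1 - k)).all vCh = true) := by
        rw [hwin]
        rw [show (0 + (u.length : Int) - k) = ((u.length : Int) - k) from by ring]
        rw [badAcc_le_iff (u ++ [c]) ((u.length : Int) - k) (by omega)]
        rw [show ((u.length : Int) - k + 1) = ((u.length : Int) + 1 - k) from by ring]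
      by_cases h2 : badAcc (u ++ [c]) ≤ 0 + (u.length : Int) - k
      · have hall : (winL (u ++ [c]) k ((u.length : Int) + 1 - k)).all vCh = true := hcond.mp h2
        have hP0 : ((0 + (u.length : Int)) ≥ k - 1 ∧ badAcc (u ++ [c]) ≤ 0 + (u.length : Int) - k) :=
          ⟨h1, h2⟩
        have hP1 : ((u.length : Int) ≥ k - 1 ∧
            (winL (u ++ [c]) k ((u.length : Int) + 1 - k)).all vCh = true) := ⟨h1', hall⟩
        rw [if_pos hP0, if_pos hP1]
        have hkmerL : (PySem.Str.slice s (some (0 + (u.length : Int) - k + 1))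
              (some (0 + (u.length : Int) + 1))).toList
            = winL (u ++ [c]) k ((u.length : Int) + 1 - k) := by
          rw [PySem.Str.toList_slice, PySem.Chars.slice_eq_listSlice]
          rw [show (0 + (u.length : Int) - k + 1) = ((u.length : Int) + 1 - k) from by ring]
          rw [show (0 + (u.length : Int) + 1) = ((u.length : Int) + 1) from by ring]
          unfold winL
          rw [show ((u.length : Int) + 1 - k + k) = ((u.length : Int) + 1) from by ring]
          exact slice_prefix (u ++ [c]) s.toList hp _ _ (by omega) (by omega) (by simp)
        set W := winL (u ++ [c]) k ((u.length : Int) + 1 - k) with hWdef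
        have hrcL : (PySem.Str.join ""
              ((PySem.Str.slice s (some (0 + (u.length : Int) - k + 1))
                (some (0 + (u.length : Int) + 1))).toList.reverse.map
                (fun x => pvCompB.getD (String.ofList [x]) "-"))).toList
            = (W.map cCh).reverse := by
          rw [PySem.Str.toList_join, hkmerL]
          rw [show ("" : String).toList = [] from rfl]
          have hmapc : W.reverse.map (fun x => pvCompB.getD (String.ofList [x]) "-")
              = W.reverse.map (fun x => String.ofList [cCh x]) := by
            apply List.map_congr_left
            intro x hx
            rw [List.mem_reverse] at hx
            exact getD_B x (by
              rw [List.all_eq_true] at hall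
              exact hall x hx)
          rw [hmapc, List.map_map]
          rw [show (String.toList ∘ fun x => String.ofList [cCh x]) = (fun n => [n]) ∘ cCh from
            funext fun n => by simp]
          rw [← List.map_map, PySem.Chars.join_nil_singletons, ← List.map_reverse]
        simp only [Prod.mk.injEq]
        refine ⟨trivial, ?_⟩
        have hemit : (if PySem.Chars.strLt
              (PySem.Str.join ""
                ((PySem.Str.slice s (some (0 + (u.length : Int) - k + 1))
                  (some (0 + (u.length : Int) + 1))).toList.reverse.map
                  (fun x => pvCompB.getD (String.ofList [x]) "-"))).toList
              (PySem.Str.slice s (some (0 + (u.length : Int) - k + 1))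
                (some (0 + (u.length : Int) + 1))).toList then
              PySem.Str.join ""
                ((PySem.Str.slice s (some (0 + (u.length : Int) - k + 1))
                  (some (0 + (u.length : Int) + 1))).toList.reverse.map
                  (fun x => pvCompB.getD (String.ofList [x]) "-"))
            else
              PySem.Str.slice s (some (0 + (u.length : Int) - k + 1))
                (some (0 + (u.length : Int) + 1)))
            = String.ofList (canonL W) := by
          unfold canonL
          rw [hrcL, hkmerL]
          split_ifs with hlt
          · rw [← hrcL, String.ofList_toList, hkmerL]
          · rw [← hkmerL, String.ofList_toList]
        rw [hemit]
      · have hnall : ¬ ((winL (u ++ [c]) k ((u.length : Int) + 1 - k)).all vCh = true) :=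
          fun hh => h2 (hcond.mpr hh)
        have hQ0 : ¬ ((0 + (u.length : Int)) ≥ k - 1 ∧ badAcc (u ++ [c]) ≤ 0 + (u.length : Int) - k) :=
          fun hh => h2 hh.2
        have hQ1 : ¬ ((u.length : Int) ≥ k - 1 ∧
            (winL (u ++ [c]) k ((u.length : Int) + 1 - k)).all vCh = true) :=
          fun hh => hnall hh.2
        rw [if_neg hQ0, if_neg hQ1]
        simp
    · have h1' : ¬ ((u.length : Int) ≥ k - 1) := by omega
      have hQ0 : ¬ ((0 + (u.length : Int)) ≥ k - 1 ∧ badAcc (u ++ [c]) ≤ 0 + (u.length : Int) - k) :=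
        fun hh => h1 hh.1
      have hQ1 : ¬ ((u.length : Int) ≥ k - 1 ∧
          (winL (u ++ [c]) k ((u.length : Int) + 1 - k)).all vCh = true) :=
        fun hh => h1' hh.1
      rw [if_neg hQ0, if_neg hQ1]
      simp

-- ===== VERDICT (by name: the statement is the Claim_ definition above) =====
set_option maxHeartbeats 1000000 in
theorem canonical_kmers_spec : Claim_unchanged_canonical_kmers := by
  intro seq k _ hD
  unfold D_canonical_kmers at hD
  have hk : 1 ≤ k := by omega
  unfold canonical_kmers_alt
  rw [if_neg (by omega)]
  rw [B_fold k hk (PySem.Str.upper seq) (PySem.Str.upper seq).toList (List.prefix_refl _)]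
  rw [A_norm seq k]
  rw [PySem.Str.toList_upper]

theorem canonical_kmers_changed : Claim_changed_canonical_kmers := by
  unfold Claim_changed_canonical_kmers; decide

set_option maxHeartbeats 1000000 in
theorem canonical_kmers_tight : Claim_exact_canonical_kmers := by
  intro seq k _ hD
  unfold D_canonical_kmers at hD
  intro hEq
  have hB : canonical_kmers_alt seq k = [] := by
    unfold canonical_kmers_alt
    rw [if_pos hD]
  rw [hB] at hEq
  have hA := A_norm seq k
  rw [hEq] at hA
  -- the window starting at n - k is empty, valid, and contributes "" to AmL
  set w := PySem.Chars.upper seq.toList with hw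
  have hlen : w.length = seq.toList.length := by
    show (seq.toList.map PySem.Chars.upperChar).length = _
    exact List.length_map ..
  have hmem : ((w.length : Int) - k) ∈ PySem.List.pyRange 0 ((w.length : Int) - k + 1) 1 := by
    rw [PySem.List.mem_pyRange_one]
    omega
  have hwin : winL w k ((w.length : Int) - k) = [] := by
    unfold winL
    rw [PySem.List.slice_toNat _ (by omega) (by omega)]
    rw [List.drop_eq_nil_of_le (by omega : w.length ≤ ((w.length : Int) - k).toNat)]
    simp
  have hmem2 : String.ofList (canonL (winL w k ((w.length : Int) - k))) ∈ AmL w k := by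
    unfold AmL
    exact List.mem_map_of_mem (List.mem_filter.mpr ⟨hmem, by rw [hwin]; rfl⟩)
  rw [← hA] at hmem2
  simp at hmem2
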